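-- pv_equiv track=rewrite | github.com/wdi2020/wdi_python | kolos/zad1.py | multi2
-- ===== SOURCE A (Python) =====
-- def multi2(T):
--     longest = 0
--     for j in T:
--         n = len(j)
--         idx =1
--         while idx <= (n//2) +1:
--             if n%idx == 0:
--                 s = ""
--                 i = 0
--                 while len(s) != idx:
--                     s+= j[i]
--                     i+=1
--                 # i = 0
--                 # while i < n//idx:
--                     # s += s
--                     # i+=1
--                 s = s * (n//idx)
--                 if s == j:
--                     if n//idx > longest:
--                         longest = n//idx
--             idx+=1
--     if longest == 1:
--         return 0
--     return longest
-- ===== SOURCE B (Python) =====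
-- def multi2(T):
--     best = 0
--     for s in T:
--         n = len(s)
--         for d in range(1, n + 1):
--             if n % d == 0 and s[:d] * (n // d) == s:
--                 r = n // d
--                 if r > best:
--                     best = r
--                 break
--     return best if best > 1 else 0
-- ===== Notes on version B (the rewrite author's own statement) =====
-- stated objective: simpler
-- what changed: Per string, B scans d = 1..n ascending and stops at the first (smallest) divisor d of n with s[:d]*(n//d) == s, taking n//d directly, instead of A's full scan of idx up to n//2+1 that rebuilds a prefix character by character for every divisor and keeps a running max.
import Mathlib
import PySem

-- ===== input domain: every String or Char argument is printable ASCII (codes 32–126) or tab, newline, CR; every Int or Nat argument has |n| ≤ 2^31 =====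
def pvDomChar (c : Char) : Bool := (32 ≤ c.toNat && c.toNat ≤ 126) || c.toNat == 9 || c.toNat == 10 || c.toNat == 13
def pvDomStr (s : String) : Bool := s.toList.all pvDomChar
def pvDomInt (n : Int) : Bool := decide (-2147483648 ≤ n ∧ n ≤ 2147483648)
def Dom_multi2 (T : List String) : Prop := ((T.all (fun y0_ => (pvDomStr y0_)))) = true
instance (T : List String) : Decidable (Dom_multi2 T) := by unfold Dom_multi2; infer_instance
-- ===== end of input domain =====

-- B re-implements multi2 per string as "first (smallest) divisor-period of an ascending scan,
-- answer n//period" instead of A's char-by-char prefix building and full scan with a running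
-- max; objective: simpler. A raises IndexError on lists containing ""; Pre_ excludes those.

-- ===== PORT A =====
-- Python string repetition s * k (used by both ports)
def pvStrMul (s : List Char) (k : Nat) : List Char := (List.replicate k s).flatten

-- A's inner while: append j[i] until len(s) == idx; pyGet? none = IndexError (outside Pre_multi2)
def pvA_build (j : List Char) (idx : Nat) (s : List Char) (i : Nat) (fuel : Nat) : List Char :=
  match fuel with
  | 0 => s
  | f + 1 =>
    if s.length = idx then s
    else
      match PySem.List.pyGet? j (i : Int) with
      | some c => pvA_build j idx (s ++ [c]) (i + 1) f
      | none => s  -- Python raises IndexError here; unreachable under Pre_multi2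

-- A's outer while over idx with guard idx <= n//2 + 1 (fuel n//2+2 covers every iteration)
def pvA_loop (j : List Char) (n : Nat) (idx : Nat) (fuel : Nat) (longest : Int) : Int :=
  match fuel with
  | 0 => longest
  | f + 1 =>
    if idx ≤ n / 2 + 1 then
      let longest' :=
        if n % idx = 0 then
          let s := pvA_build j idx [] 0 (idx + 1)
          let s2 := pvStrMul s (n / idx)
          if s2 = j then
            (if ((n / idx : Nat) : Int) > longest then ((n / idx : Nat) : Int) else longest)
          else longest
        else longest
      pvA_loop j n (idx + 1) f longest'
    else longest

def multi2 (T : List String) : Int :=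
  let longest := T.foldl (fun longest j =>
    pvA_loop j.toList j.toList.length 1 (j.toList.length / 2 + 2) longest) 0
  if longest = 1 then 0 else longest

-- ===== PORT B =====
-- B's for-loop with break: first d in 1..n with n % d == 0 and s[:d]*(n//d) == s
def pvB_loop (s : List Char) (n : Nat) (d : Nat) (fuel : Nat) (best : Int) : Int :=
  match fuel with
  | 0 => best
  | f + 1 =>
    if n % d = 0 ∧ pvStrMul (s.take d) (n / d) = s then
      (if ((n / d : Nat) : Int) > best then ((n / d : Nat) : Int) else best)
    else pvB_loop s n (d + 1) f best

def multi2_alt (T : List String) : Int :=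
  let best := T.foldl (fun best s =>
    pvB_loop s.toList s.toList.length 1 s.toList.length best) 0
  if best > 1 then best else 0

-- ===== PRECONDITION & SPEC =====
-- A raises IndexError (j[0] on an empty string) whenever T contains ""; Pre_ excludes exactly those inputs.
def Pre_multi2 (T : List String) : Prop := "" ∉ T
instance (T : List String) : Decidable (Pre_multi2 T) := by unfold Pre_multi2; infer_instance
def pvWitness_multi2 : List String := (["abab", "ccc", "xy"])

def Spec_multi2 (T : List String) (out : Int) : Prop := out = multi2_alt T
instance (T : List String) (out : Int) : Decidable (Spec_multi2 T out) := by unfold Spec_multi2; infer_instance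

-- ===== CLAIM (what is proved, stated in full; the proofs are below) =====
def Claim_equal_multi2 : Prop := ∀ (T : List String), Dom_multi2 T → Pre_multi2 T → Spec_multi2 T (multi2 T)

-- ===== LEMMAS AND PROOFS =====

-- the per-index test both loops apply: d divides n and the first d chars repeated rebuild c
def pvQual (c : List Char) (n d : Nat) : Bool :=
  decide (n % d = 0 ∧ pvStrMul (c.take d) (n / d) = c)

lemma pvQual_iff (c : List Char) (n d : Nat) :
    pvQual c n d = true ↔ (n % d = 0 ∧ pvStrMul (c.take d) (n / d) = c) := by
  simp [pvQual]

-- running max over a list of candidate indices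
def pvBestOf (c : List Char) (n : Nat) (ks : List Nat) (L : Int) : Int :=
  ks.foldl (fun acc k => if pvQual c n k then max acc ((n / k : Nat) : Int) else acc) L

lemma pv_ite_max (L x : Int) : (if x > L then x else L) = max L x := by
  rw [max_def]; split_ifs <;> omega

lemma pvA_build_eq_take (j : List Char) (idx : Nat) :
    ∀ (fuel i : Nat), i ≤ idx → idx ≤ j.length → idx ≤ i + fuel →
      pvA_build j idx (j.take i) i fuel = j.take idx := by
  intro fuel
  induction fuel with
  | zero =>
    intro i h1 h2 h3
    have : i = idx := by omega
    simp [pvA_build, this]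
  | succ f ih =>
    intro i h1 h2 h3
    rw [pvA_build]
    have hlen : (j.take i).length = i := by simp; omega
    by_cases he : i = idx
    · rw [if_pos (by rw [hlen, he])]
      rw [he]
    · have hi : i < j.length := by omega
      rw [if_neg (by rw [hlen]; exact he)]
      rw [PySem.List.pyGet?_natCast, List.getElem?_eq_getElem hi]
      have htake : j.take i ++ [j[i]] = j.take (i + 1) := by
        rw [List.take_add_one, List.getElem?_eq_getElem hi]
        rfl
      simp only [htake]
      exact ih (i + 1) (by omega) h2 (by omega)

lemma pvA_build_spec (j : List Char) (idx : Nat) (h : idx ≤ j.length) :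
    pvA_build j idx [] 0 (idx + 1) = j.take idx := by
  have := pvA_build_eq_take j idx (idx + 1) 0 (by omega) h (by omega)
  simpa using this

lemma pvBestOf_nil (c : List Char) (n : Nat) (L : Int) : pvBestOf c n [] L = L := rfl

lemma pvBestOf_cons (c : List Char) (n k : Nat) (ks : List Nat) (L : Int) :
    pvBestOf c n (k :: ks) L
      = pvBestOf c n ks (if pvQual c n k then max L ((n / k : Nat) : Int) else L) := rfl

lemma pvBestOf_append (c : List Char) (n : Nat) (ks ks' : List Nat) (L : Int) :
    pvBestOf c n (ks ++ ks') L = pvBestOf c n ks' (pvBestOf c n ks L) := by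
  simp [pvBestOf, List.foldl_append]

lemma le_pvBestOf (c : List Char) (n : Nat) (ks : List Nat) (L : Int) :
    L ≤ pvBestOf c n ks L := by
  induction ks generalizing L with
  | nil => simp [pvBestOf_nil]
  | cons k ks ih =>
    rw [pvBestOf_cons]
    refine le_trans ?_ (ih _)
    split_ifs
    · exact le_max_left _ _
    · exact le_rfl

lemma pvBestOf_mono (c : List Char) (n : Nat) (ks : List Nat) {L L' : Int} (h : L ≤ L') :
    pvBestOf c n ks L ≤ pvBestOf c n ks L' := by
  induction ks generalizing L L' with
  | nil => simpa [pvBestOf_nil]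
  | cons k ks ih =>
    rw [pvBestOf_cons, pvBestOf_cons]
    apply ih
    split_ifs
    · exact sup_le_sup_right h _
    · exact h

lemma pvBestOf_le (c : List Char) (n : Nat) (ks : List Nat) (X : Int)
    (hb : ∀ k ∈ ks, pvQual c n k = true → ((n / k : Nat) : Int) ≤ X) :
    ∀ L : Int, L ≤ X → pvBestOf c n ks L ≤ X := by
  induction ks with
  | nil => intro L hL; simpa [pvBestOf_nil]
  | cons k ks ih =>
    intro L hL
    rw [pvBestOf_cons]
    apply ih (fun k hk => hb k (List.mem_cons_of_mem _ hk))
    split_ifs with hq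
    · exact max_le hL (hb k List.mem_cons_self hq)
    · exact hL

lemma pvBestOf_max (c : List Char) (n : Nat) (ks : List Nat) (X : Int) :
    ∀ L : Int, pvBestOf c n ks (max L X) = max (pvBestOf c n ks L) X := by
  induction ks with
  | nil => intro L; simp [pvBestOf_nil]
  | cons k ks ih =>
    intro L
    rw [pvBestOf_cons, pvBestOf_cons]
    split_ifs with hq
    · rw [max_right_comm]
      exact ih (max L ((n / k : Nat) : Int))
    · exact ih L

lemma pvA_loop_eq_bestOf (c : List Char) (hn : c ≠ []) :
    ∀ (fuel d : Nat) (L : Int), 1 ≤ d → c.length / 2 + 2 ≤ d + fuel →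
      pvA_loop c c.length d fuel L
        = pvBestOf c c.length (List.range' d (c.length / 2 + 2 - d)) L := by
  have hn1 : 1 ≤ c.length := List.length_pos_iff.mpr hn
  intro fuel
  induction fuel with
  | zero =>
    intro d L h1 h2
    have h0 : c.length / 2 + 2 - d = 0 := by omega
    simp [pvA_loop, h0, pvBestOf_nil]
  | succ f ih =>
    intro d L h1 h2
    rw [pvA_loop]
    by_cases hg : d ≤ c.length / 2 + 1
    · rw [if_pos hg]
      dsimp only
      have hd : d ≤ c.length := by omega
      rw [pvA_build_spec c d hd]
      have hrange : c.length / 2 + 2 - d = (c.length / 2 + 2 - (d + 1)) + 1 := by omega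
      rw [hrange, List.range'_succ, pvBestOf_cons]
      have hbody :
          (if c.length % d = 0 then
            if pvStrMul (c.take d) (c.length / d) = c then
              (if ((c.length / d : Nat) : Int) > L then ((c.length / d : Nat) : Int) else L)
            else L
          else L)
          = (if pvQual c c.length d then max L ((c.length / d : Nat) : Int) else L) := by
        by_cases h0 : c.length % d = 0
        · by_cases hs : pvStrMul (c.take d) (c.length / d) = c
          · rw [if_pos h0, if_pos hs, if_pos ((pvQual_iff _ _ _).mpr ⟨h0, hs⟩), pv_ite_max]
          · rw [if_pos h0, if_neg hs,
              if_neg (fun hq => hs ((pvQual_iff _ _ _).mp hq).2)]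
        · rw [if_neg h0, if_neg (fun hq => h0 ((pvQual_iff _ _ _).mp hq).1)]
      rw [hbody]
      exact ih (d + 1) _ (by omega) (by omega)
    · rw [if_neg hg]
      have h0 : c.length / 2 + 2 - d = 0 := by omega
      simp [h0, pvBestOf_nil]

lemma pvB_loop_eq_bestOf (c : List Char) (hn : c ≠ []) :
    ∀ (fuel d : Nat) (L : Int), 1 ≤ d → c.length + 1 ≤ d + fuel →
      pvB_loop c c.length d fuel L
        = pvBestOf c c.length (List.range' d (c.length + 1 - d)) L := by
  have hn1 : 1 ≤ c.length := List.length_pos_iff.mpr hn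
  intro fuel
  induction fuel with
  | zero =>
    intro d L h1 h2
    have h0 : c.length + 1 - d = 0 := by omega
    simp [pvB_loop, h0, pvBestOf_nil]
  | succ f ih =>
    intro d L h1 h2
    rw [pvB_loop]
    by_cases hd : d ≤ c.length
    · have hrange : c.length + 1 - d = (c.length + 1 - (d + 1)) + 1 := by omega
      rw [hrange, List.range'_succ, pvBestOf_cons]
      by_cases hq : pvQual c c.length d = true
      · obtain ⟨hq1, hq2⟩ := (pvQual_iff _ _ _).mp hq
        rw [if_pos ⟨hq1, hq2⟩, if_pos hq, pv_ite_max]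
        -- after the break, the remaining candidates can only give smaller values
        refine (le_antisymm ?_ (le_pvBestOf _ _ _ _)).symm
        apply pvBestOf_le
        · intro k hk hqk
          have hk1 : d + 1 ≤ k := (List.mem_range'_1.mp hk).1
          have hdd : c.length / k ≤ c.length / d := Nat.div_le_div_left (by omega) (by omega)
          calc ((c.length / k : Nat) : Int) ≤ ((c.length / d : Nat) : Int) := by exact_mod_cast hdd
            _ ≤ max L ((c.length / d : Nat) : Int) := le_max_right _ _
        · exact le_rfl
      · rw [if_neg (fun h => hq ((pvQual_iff _ _ _).mpr h)), if_neg hq]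
        exact ih (d + 1) L (by omega) (by omega)
    · -- d > n (only reachable with surplus fuel): n % d = n ≠ 0, the test is false
      have hmod : c.length % d = c.length := Nat.mod_eq_of_lt (by omega)
      rw [if_neg (fun h => by omega : ¬(c.length % d = 0 ∧ pvStrMul (c.take d) (c.length / d) = c))]
      rw [ih (d + 1) L (by omega) (by omega)]
      have e1 : c.length + 1 - d = 0 := by omega
      have e2 : c.length + 1 - (d + 1) = 0 := by omega
      rw [e1, e2]
      rfl

-- the tail of B's scan past A's bound can raise the running max to at most 1
lemma pvBestOf_tail_le (c : List Char) (s m : Nat) (hs : c.length / 2 + 2 ≤ s) (X : Int) :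
    pvBestOf c c.length (List.range' s m) X ≤ max X 1 := by
  apply pvBestOf_le
  · intro k hk hq
    have hk1 : s ≤ k := (List.mem_range'_1.mp hk).1
    have hlt : c.length / k < 2 := (Nat.div_lt_iff_lt_mul (by omega : 0 < k)).mpr (by omega)
    calc ((c.length / k : Nat) : Int) ≤ 1 := by exact_mod_cast Nat.lt_succ_iff.mp hlt
      _ ≤ max X 1 := le_max_right _ _
  · exact le_max_left _ _

-- the per-string steps of the two folds preserve the bracket LA ≤ LB ≤ max LA 1
lemma pv_step_rel (s : String) (hs : s ≠ "") (LA LB : Int)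
    (h0 : 0 ≤ LA) (h1 : LA ≤ LB) (h2 : LB ≤ max LA 1) :
    0 ≤ pvA_loop s.toList s.toList.length 1 (s.toList.length / 2 + 2) LA ∧
    pvA_loop s.toList s.toList.length 1 (s.toList.length / 2 + 2) LA
      ≤ pvB_loop s.toList s.toList.length 1 s.toList.length LB ∧
    pvB_loop s.toList s.toList.length 1 s.toList.length LB
      ≤ max (pvA_loop s.toList s.toList.length 1 (s.toList.length / 2 + 2) LA) 1 := by
  set c := s.toList with hc
  have hne : c ≠ [] := fun h => hs (String.toList_eq_nil_iff.mp h)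
  have hn1 : 1 ≤ c.length := List.length_pos_iff.mpr hne
  rw [pvA_loop_eq_bestOf c hne _ 1 LA le_rfl (by omega)]
  rw [pvB_loop_eq_bestOf c hne _ 1 LB le_rfl (by omega)]
  have eA : c.length / 2 + 2 - 1 = c.length / 2 + 1 := by omega
  have eB : c.length + 1 - 1 = c.length := by omega
  rw [eA, eB]
  have hsplit : List.range' 1 c.length
      = List.range' 1 (c.length / 2 + 1) ++ List.range' (c.length / 2 + 2) (c.length - (c.length / 2 + 1)) := by
    have := List.range'_append_1 (s := 1) (m := c.length / 2 + 1) (n := c.length - (c.length / 2 + 1))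
    rw [show 1 + (c.length / 2 + 1) = c.length / 2 + 2 by omega] at this
    rw [show c.length / 2 + 1 + (c.length - (c.length / 2 + 1)) = c.length by omega] at this
    exact this.symm
  rw [hsplit, pvBestOf_append]
  refine ⟨le_trans h0 (le_pvBestOf _ _ _ _), ?_, ?_⟩
  · exact le_trans (pvBestOf_mono c c.length _ h1) (le_pvBestOf _ _ _ _)
  · refine le_trans (pvBestOf_tail_le c _ _ le_rfl _) ?_
    have hmid : pvBestOf c c.length (List.range' 1 (c.length / 2 + 1)) LB
        ≤ max (pvBestOf c c.length (List.range' 1 (c.length / 2 + 1)) LA) 1 := by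
      refine le_trans (pvBestOf_mono c c.length _ h2) ?_
      rw [pvBestOf_max]
    calc max (pvBestOf c c.length (List.range' 1 (c.length / 2 + 1)) LB) 1
        ≤ max (max (pvBestOf c c.length (List.range' 1 (c.length / 2 + 1)) LA) 1) 1 :=
          sup_le_sup_right hmid 1
      _ = max (pvBestOf c c.length (List.range' 1 (c.length / 2 + 1)) LA) 1 := by
          rw [max_assoc, max_self]


-- the fold invariant over the whole list
lemma pv_fold_rel (T : List String) (hT : ∀ s ∈ T, s ≠ "") :
    ∀ (LA LB : Int), 0 ≤ LA → LA ≤ LB → LB ≤ max LA 1 →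
      0 ≤ T.foldl (fun longest j => pvA_loop j.toList j.toList.length 1 (j.toList.length / 2 + 2) longest) LA ∧
      T.foldl (fun longest j => pvA_loop j.toList j.toList.length 1 (j.toList.length / 2 + 2) longest) LA
        ≤ T.foldl (fun best s => pvB_loop s.toList s.toList.length 1 s.toList.length best) LB ∧
      T.foldl (fun best s => pvB_loop s.toList s.toList.length 1 s.toList.length best) LB
        ≤ max (T.foldl (fun longest j => pvA_loop j.toList j.toList.length 1 (j.toList.length / 2 + 2) longest) LA) 1 := by
  induction T with
  | nil => intro LA LB g0 g1 g2; exact ⟨g0, g1, g2⟩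
  | cons s T ih =>
    intro LA LB g0 g1 g2
    have hs : s ≠ "" := hT s List.mem_cons_self
    obtain ⟨k0, k1, k2⟩ := pv_step_rel s hs LA LB g0 g1 g2
    exact ih (fun x hx => hT x (List.mem_cons_of_mem _ hx)) _ _ k0 k1 k2

-- ===== VERDICT (by name: the statement is the Claim_ definition above) =====
theorem multi2_spec : Claim_equal_multi2 := by
  intro T _ hpre
  unfold Spec_multi2 multi2 multi2_alt
  dsimp only
  obtain ⟨h0, h1, h2⟩ :=
    pv_fold_rel T (fun s hs => by rintro rfl; exact hpre hs) 0 0 le_rfl le_rfl (by simp)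
  set A := T.foldl (fun longest j =>
    pvA_loop j.toList j.toList.length 1 (j.toList.length / 2 + 2) longest) 0 with hA
  set B := T.foldl (fun best s =>
    pvB_loop s.toList s.toList.length 1 s.toList.length best) 0 with hB
  have hB' : B ≤ A ∨ B ≤ 1 := by
    rcases le_total A 1 with h | h
    · right; rw [max_eq_right h] at h2; exact h2
    · left; rw [max_eq_left h] at h2; exact h2
  split_ifs <;> omega
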